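-- pv_equiv track=rewrite | github.com/jignesh2619/Easy-Excel-backend | utils/knowledge_base.py | get_task_decision_guide
-- ===== SOURCE A (Python) =====
-- def get_task_decision_guide(user_prompt: str) -> dict:
--     """
--     Analyze user prompt and suggest task based on knowledge base
--     Optimized for token efficiency - minimal output
--
--     Args:
--         user_prompt: User's natural language request
--
--     Returns:
--         Dictionary with suggested task (simplified)
--     """
--     prompt_lower = user_prompt.lower()
--
--     # Quick keyword checks (most common patterns first)
--     # Check for cleaning keywords
--     cleaning_keywords = ["clean", "remove duplicates", "fix formatting", "duplicate", "remove empty"]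
--     has_cleaning = any(keyword in prompt_lower for keyword in cleaning_keywords)
--
--     # Check for statistics keywords
--     stats_keywords = ["summary", "statistics", "describe", "statistical"]
--     has_stats = any(keyword in prompt_lower for keyword in stats_keywords)
--
--     # Check for grouping keywords
--     group_keywords = ["group", "group by", "sum by", "count by"]
--     has_group = any(keyword in prompt_lower for keyword in group_keywords)
--
--     # Decision logic (simplified - only return task, no verbose reasoning)
--     if has_cleaning:
--         return {"suggested_task": "clean"}
--     elif has_stats:
--         return {"suggested_task": "summarize"}
--     elif has_group:
--         return {"suggested_task": "group_by"}
--     else: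
--         return {"suggested_task": "auto-detect"}
-- ===== SOURCE B (Python) =====
-- # B: single left-to-right positional scan with naive multi-pattern prefix matching
-- # against a flat keyword->priority table, keeping the minimum priority found;
-- # the answer is an index into a task array (min priority = highest-priority category).
-- KEYWORDS = [
--     ("clean", 0), ("remove duplicates", 0), ("fix formatting", 0),
--     ("duplicate", 0), ("remove empty", 0),
--     ("summary", 1), ("statistics", 1), ("describe", 1), ("statistical", 1),
--     ("group", 2), ("group by", 2), ("sum by", 2), ("count by", 2),
-- ]
-- TASKS = ["clean", "summarize", "group_by", "auto-detect"]
--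
--
-- def get_task_decision_guide(user_prompt: str) -> dict:
--     p = user_prompt.lower()
--     best = 3
--     for i in range(len(p)):
--         for kw, pr in KEYWORDS:
--             if pr < best and p.startswith(kw, i):
--                 best = pr
--     return {"suggested_task": TASKS[best]}
-- ===== Notes on version B (the rewrite author's own statement) =====
-- stated objective: alternative
-- what changed: Replaced per-category substring-containment tests and an if/elif chain by a single left-to-right positional scan of the lowered prompt that does naive multi-pattern prefix matching at each position against one flat keyword->priority table, keeping the minimum priority, and indexes a task array with it.
import Mathlib
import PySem

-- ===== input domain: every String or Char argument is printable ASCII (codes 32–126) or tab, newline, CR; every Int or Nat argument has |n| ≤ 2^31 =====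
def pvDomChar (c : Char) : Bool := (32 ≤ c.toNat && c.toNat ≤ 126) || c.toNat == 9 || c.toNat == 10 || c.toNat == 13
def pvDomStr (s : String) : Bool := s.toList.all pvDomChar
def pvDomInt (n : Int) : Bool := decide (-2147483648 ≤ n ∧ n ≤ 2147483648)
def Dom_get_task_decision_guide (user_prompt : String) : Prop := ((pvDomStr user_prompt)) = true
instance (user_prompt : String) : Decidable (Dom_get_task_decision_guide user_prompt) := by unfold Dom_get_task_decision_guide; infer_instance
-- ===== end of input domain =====

-- B replaces per-category substring tests + if/elif chain by a single positional scan with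
-- multi-pattern prefix matching and a min-priority accumulator (alternative algorithm, same cost class).


-- ===== PORT A =====
def get_task_decision_guide (user_prompt : String) : List (String × String) :=
  let prompt_lower := PySem.Str.lower user_prompt
  let cleaning_keywords : List String := ["clean", "remove duplicates", "fix formatting", "duplicate", "remove empty"]
  let has_cleaning := cleaning_keywords.any (fun k => PySem.Str.isIn k prompt_lower)
  let stats_keywords : List String := ["summary", "statistics", "describe", "statistical"]
  let has_stats := stats_keywords.any (fun k => PySem.Str.isIn k prompt_lower)
  let group_keywords : List String := ["group", "group by", "sum by", "count by"]
  let has_group := group_keywords.any (fun k => PySem.Str.isIn k prompt_lower)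
  if has_cleaning then [("suggested_task", "clean")]
  else if has_stats then [("suggested_task", "summarize")]
  else if has_group then [("suggested_task", "group_by")]
  else [("suggested_task", "auto-detect")]

-- ===== PORT B =====
-- flat keyword -> priority table and the task array indexed by priority
def pvKw : List (String × Nat) :=
  [("clean", 0), ("remove duplicates", 0), ("fix formatting", 0), ("duplicate", 0), ("remove empty", 0),
   ("summary", 1), ("statistics", 1), ("describe", 1), ("statistical", 1),
   ("group", 2), ("group by", 2), ("sum by", 2), ("count by", 2)]
def pvTasks : List String := ["clean", "summarize", "group_by", "auto-detect"]

-- p.startswith(kw, i) with 0 ≤ i ≤ len(p) is exactly a prefix test on the i-th suffix;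
-- TASKS[best] is in range because best ≤ 3 always, so getD's default is unreachable.
def get_task_decision_guide_alt (user_prompt : String) : List (String × String) :=
  let p := (PySem.Str.lower user_prompt).toList
  let best := (List.range p.length).foldl (fun b i =>
      pvKw.foldl (fun b e =>
        if e.2 < b && PySem.Chars.startswith (p.drop i) e.1.toList then e.2 else b) b) 3
  [("suggested_task", pvTasks.getD best "auto-detect")]

-- ===== PRECONDITION & SPEC =====
def Spec_get_task_decision_guide (user_prompt : String) (out : List (String × String)) : Prop := out = get_task_decision_guide_alt user_prompt
instance (user_prompt : String) (out : List (String × String)) : Decidable (Spec_get_task_decision_guide user_prompt out) := by unfold Spec_get_task_decision_guide; infer_instance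

-- ===== CLAIM (what is proved, stated in full; the proofs are below) =====
def Claim_equal_get_task_decision_guide : Prop := ∀ (user_prompt : String), Dom_get_task_decision_guide user_prompt → Spec_get_task_decision_guide user_prompt (get_task_decision_guide user_prompt)

-- ===== LEMMAS AND PROOFS =====

-- the inner table fold computes the min of b and the priorities of the entries matching here
lemma pv_foldl_filter_min (l : List (String × Nat)) (q : String × Nat → Bool) (b : Nat) :
    l.foldl (fun b e => if e.2 < b && q e then e.2 else b) b
      = ((l.filter q).map (·.2)).foldl Nat.min b := by
  induction l generalizing b with
  | nil => rfl
  | cons e t ih =>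
    simp only [List.foldl_cons]
    cases hq : q e with
    | false =>
      have hacc : (if (decide (e.2 < b) && false) = true then e.2 else b) = b := by
        simp
      rw [List.filter_cons_of_neg (by simp [hq]), hacc]
      exact ih b
    | true =>
      have hacc : (if (decide (e.2 < b) && true) = true then e.2 else b) = Nat.min b e.2 := by
        simp only [Bool.and_true, decide_eq_true_eq, Nat.min_def]
        split_ifs <;> omega
      rw [List.filter_cons_of_pos hq, List.map_cons, List.foldl_cons, hacc]
      exact ih _

-- folding min over per-position folds = min over the concatenation
lemma pv_foldl_foldl_min (g : Nat → List Nat) (l : List Nat) (s : Nat) :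
    l.foldl (fun b i => (g i).foldl Nat.min b) s = (l.flatMap g).foldl Nat.min s := by
  induction l generalizing s with
  | nil => rfl
  | cons a t ih => simp [List.foldl_append, ih]

lemma pv_foldl_min_le (L : List Nat) (s : Nat) : L.foldl Nat.min s ≤ s := by
  induction L generalizing s with
  | nil => simp
  | cons a t ih => exact le_trans (ih (Nat.min s a)) (Nat.min_le_left _ _)

lemma pv_foldl_min_le_mem (L : List Nat) (s x : Nat) (hx : x ∈ L) : L.foldl Nat.min s ≤ x := by
  induction L generalizing s with
  | nil => cases hx
  | cons a t ih =>
    rcases List.mem_cons.mp hx with rfl | hx'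
    · exact le_trans (pv_foldl_min_le t _) (Nat.min_le_right _ _)
    · exact ih _ hx'

lemma pv_foldl_min_mem_or (L : List Nat) (s : Nat) :
    L.foldl Nat.min s = s ∨ L.foldl Nat.min s ∈ L := by
  induction L generalizing s with
  | nil => exact Or.inl rfl
  | cons a t ih =>
    simp only [List.foldl_cons]
    rcases ih (Nat.min s a) with h | h
    · rw [h]
      rcases Nat.le_total s a with hle | hle
      · exact Or.inl (Nat.min_eq_left hle)
      · exact Or.inr (by simp [Nat.min_eq_right hle])
    · exact Or.inr (List.mem_cons_of_mem _ h)

-- the priorities matched anywhere in p by the positional scan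
def pvMatched (p : List Char) : List Nat :=
  (List.range p.length).flatMap (fun i =>
    ((pvKw.filter (fun e => PySem.Chars.startswith (p.drop i) e.1.toList)).map (·.2)))

-- a priority occurs among the positional matches iff some table keyword of that priority is a substring
lemma pv_mem_matched (p : List Char) (pr : Nat) :
    pr ∈ pvMatched p ↔ ∃ e ∈ pvKw, e.2 = pr ∧ PySem.Chars.isIn e.1.toList p = true := by
  have hne : ∀ e ∈ pvKw, e.1.toList ≠ ([] : List Char) := by decide
  unfold pvMatched
  simp only [List.mem_flatMap, List.mem_range, List.mem_map, List.mem_filter]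
  constructor
  · rintro ⟨i, _, e, ⟨he, hsw⟩, rfl⟩
    refine ⟨e, he, rfl, ?_⟩
    rw [← PySem.Chars.exists_prefix_drop_iff_isIn]
    exact ⟨i, (PySem.Chars.startswith_iff _ _).mp hsw⟩
  · rintro ⟨e, he, rfl, hin⟩
    obtain ⟨j, hj⟩ := (PySem.Chars.exists_prefix_drop_iff_isIn _ _).mpr hin
    have hjlt : j < p.length := by
      by_contra h
      have : p.drop j = [] := List.drop_eq_nil_of_le (by omega)
      rw [this, List.prefix_nil] at hj
      exact hne e he hj
    exact ⟨j, hjlt, e, ⟨he, (PySem.Chars.startswith_iff _ _).mpr hj⟩, rfl⟩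

-- ===== VERDICT (by name: the statement is the Claim_ definition above) =====
theorem get_task_decision_guide_spec : Claim_equal_get_task_decision_guide := by
  intro user_prompt _
  unfold Spec_get_task_decision_guide get_task_decision_guide get_task_decision_guide_alt
  set p : List Char := (PySem.Str.lower user_prompt).toList with hp
  have hbest :
      (List.range p.length).foldl (fun b i =>
        pvKw.foldl (fun b e =>
          if e.2 < b && PySem.Chars.startswith (p.drop i) e.1.toList then e.2 else b) b) 3
      = (pvMatched p).foldl Nat.min 3 := by
    have h1 : ∀ (b i : Nat),
        pvKw.foldl (fun b e =>
          if e.2 < b && PySem.Chars.startswith (p.drop i) e.1.toList then e.2 else b) b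
        = ((pvKw.filter (fun e => PySem.Chars.startswith (p.drop i) e.1.toList)).map (·.2)).foldl Nat.min b := by
      intro b i; exact pv_foldl_filter_min _ _ _
    simp only [h1]
    exact pv_foldl_foldl_min _ _ _
  set best := (pvMatched p).foldl Nat.min 3 with hbd
  have hmem_le2 : ∀ x ∈ pvMatched p, x ≤ 2 := by
    intro x hx
    obtain ⟨e, he, rfl, -⟩ := (pv_mem_matched p x).mp hx
    have h2 : ∀ e ∈ pvKw, e.2 ≤ 2 := by decide
    exact h2 e he
  have hiff : ∀ (pr : Nat) (cat : List String), (∀ k ∈ cat, (k, pr) ∈ pvKw) →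
      (∀ e ∈ pvKw, e.2 = pr → e.1 ∈ cat) →
      (pr ∈ pvMatched p ↔ ∃ k ∈ cat, PySem.Chars.isIn k.toList p = true) := by
    intro pr cat hfwd hbwd
    rw [pv_mem_matched]
    constructor
    · rintro ⟨e, he, hpr, hin⟩
      exact ⟨e.1, hbwd e he hpr, hin⟩
    · rintro ⟨k, hk, hin⟩
      exact ⟨(k, pr), hfwd k hk, rfl, hin⟩
  have hiff0 := hiff 0 ["clean", "remove duplicates", "fix formatting", "duplicate", "remove empty"]
      (by decide) (by decide)
  have hiff1 := hiff 1 ["summary", "statistics", "describe", "statistical"] (by decide) (by decide)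
  have hiff2 := hiff 2 ["group", "group by", "sum by", "count by"] (by decide) (by decide)
  simp only [hbest, List.any_eq_true, PySem.Str.isIn_eq, ← hp]
  split_ifs with hc hs hg
  · -- cleaning matched: best = 0
    have h0 : (0 : Nat) ∈ pvMatched p := hiff0.mpr (by simpa using hc)
    have hb : best = 0 := Nat.le_zero.mp (pv_foldl_min_le_mem _ _ _ h0)
    rw [hb]; rfl
  · -- stats matched, cleaning not: best = 1
    have h0 : (0 : Nat) ∉ pvMatched p := fun h => hc (by simpa using hiff0.mp h)
    have h1 : (1 : Nat) ∈ pvMatched p := hiff1.mpr (by simpa using hs)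
    have hle : best ≤ 1 := pv_foldl_min_le_mem _ _ _ h1
    have hb : best = 1 := by
      rcases pv_foldl_min_mem_or (pvMatched p) 3 with h | h
      · rw [← hbd] at h; omega
      · rw [← hbd] at h
        have hne0 : best ≠ 0 := fun h' => h0 (h' ▸ h)
        omega
    rw [hb]; rfl
  · -- grouping matched, the others not: best = 2
    have h0 : (0 : Nat) ∉ pvMatched p := fun h => hc (by simpa using hiff0.mp h)
    have h1 : (1 : Nat) ∉ pvMatched p := fun h => hs (by simpa using hiff1.mp h)
    have h2 : (2 : Nat) ∈ pvMatched p := hiff2.mpr (by simpa using hg)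
    have hle : best ≤ 2 := pv_foldl_min_le_mem _ _ _ h2
    have hb : best = 2 := by
      rcases pv_foldl_min_mem_or (pvMatched p) 3 with h | h
      · rw [← hbd] at h; omega
      · rw [← hbd] at h
        have hne0 : best ≠ 0 := fun h' => h0 (h' ▸ h)
        have hne1 : best ≠ 1 := fun h' => h1 (h' ▸ h)
        omega
    rw [hb]; rfl
  · -- nothing matched: best = 3
    have h0 : (0 : Nat) ∉ pvMatched p := fun h => hc (by simpa using hiff0.mp h)
    have h1 : (1 : Nat) ∉ pvMatched p := fun h => hs (by simpa using hiff1.mp h)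
    have h2 : (2 : Nat) ∉ pvMatched p := fun h => hg (by simpa using hiff2.mp h)
    have hb : best = 3 := by
      rcases pv_foldl_min_mem_or (pvMatched p) 3 with h | h
      · exact h
      · rw [← hbd] at h
        have hle2 := hmem_le2 _ h
        have hne0 : best ≠ 0 := fun h' => h0 (h' ▸ h)
        have hne1 : best ≠ 1 := fun h' => h1 (h' ▸ h)
        have hne2 : best ≠ 2 := fun h' => h2 (h' ▸ h)
        omega
    rw [hb]; rfl
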